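-- pv_equiv track=rewrite | github.com/marcr2/ECPM | backend/ecpm/structural/departments.py | classify_departments
-- ===== SOURCE A (Python) =====
-- DEPT_I_CODES: set[str] = {
--     # Mining
--     "211",   # Oil and gas extraction
--     "212",   # Mining (except oil and gas)
--     "213",   # Support activities for mining
--     # Utilities (power generation infrastructure)
--     "22",    # Utilities
--     # Construction
--     "23",    # Construction
--     # Manufacturing - durable goods (machinery, equipment, metals)
--     "321",   # Wood products
--     "327",   # Nonmetallic mineral products
--     "331",   # Primary metals
--     "332",   # Fabricated metal products
--     "333",   # Machinery
--     "334",   # Computer and electronic products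
--     "335",   # Electrical equipment, appliances
--     "336",   # Transportation equipment
--     # Manufacturing - chemicals, plastics (industrial inputs)
--     "325",   # Chemical products
--     "326",   # Plastics and rubber products
--     # Wholesale trade (intermediate distribution)
--     "42",    # Wholesale trade
--     # Transportation and warehousing (means of circulation)
--     "481",   # Air transportation
--     "482",   # Rail transportation
--     "483",   # Water transportation
--     "484",   # Truck transportation
--     "485",   # Transit and ground passenger
--     "486",   # Pipeline transportation
--     "487OS", # Other transportation and support
--     "493",   # Warehousing and storage
--     # Information (telecommunications infrastructure)
--     "511",   # Publishing industries
--     "512",   # Motion picture and sound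
--     "513",   # Broadcasting and telecommunications
--     "514",   # Data processing, internet
-- }
--
-- def classify_departments(naics_codes: list[str]) -> dict[str, str]:
--     """Classify NAICS codes into Department I or Department II.
--
--     Department I: Means of production (capital goods, raw materials,
--     machinery, industrial inputs).
--     Department II: Means of consumption (consumer goods and services).
--
--     Args:
--         naics_codes: List of NAICS codes to classify.
--
--     Returns:
--         Dict mapping each code to "Dept_I" or "Dept_II".
--     """
--     result = {}
--     for code in naics_codes:
--         # Check exact match first
--         if code in DEPT_I_CODES:
--             result[code] = "Dept_I"
--         # Check prefix match (e.g., "211A" matches "211")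
--         elif any(code.startswith(prefix) for prefix in DEPT_I_CODES):
--             result[code] = "Dept_I"
--         else:
--             result[code] = "Dept_II"
--     return result
-- ===== SOURCE B (Python) =====
-- DEPT_I_CODES: set[str] = {
--     "211", "212", "213", "22", "23",
--     "321", "327", "331", "332", "333", "334", "335", "336",
--     "325", "326", "42",
--     "481", "482", "483", "484", "485", "486", "487OS", "493",
--     "511", "512", "513", "514",
-- }
--
-- # The distinct prefix lengths occurring in DEPT_I_CODES (derived once, not hardcoded).
-- _PREFIX_LENS: list[int] = sorted({len(p) for p in DEPT_I_CODES})
--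
--
-- def _dept(code: str) -> str:
--     """Department of a single code: set lookups of its prefixes at the known lengths."""
--     return ("Dept_I"
--             if any(code[:n] in DEPT_I_CODES for n in _PREFIX_LENS)
--             else "Dept_II")
--
--
-- def classify_departments(naics_codes: list[str]) -> dict[str, str]:
--     """Classify NAICS codes into Department I or Department II."""
--     # The value depends only on the key, so the result is just the distinct
--     # codes (first-occurrence order) each paired with its department.
--     return dict((code, _dept(code)) for code in dict.fromkeys(naics_codes))
-- ===== Notes on version B (the rewrite author's own statement) =====
-- stated objective: faster
-- what changed: A folds every code through a dict with a per-code linear startswith-scan over all 28 DEPT_I codes (plus a redundant exact-match branch); B first deduplicates the codes (first occurrence order), classifies each distinct code once by direct set lookups of its prefixes at the 3 distinct prefix lengths derived from DEPT_I_CODES, and assembles the dict from those pairs.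
import Mathlib
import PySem

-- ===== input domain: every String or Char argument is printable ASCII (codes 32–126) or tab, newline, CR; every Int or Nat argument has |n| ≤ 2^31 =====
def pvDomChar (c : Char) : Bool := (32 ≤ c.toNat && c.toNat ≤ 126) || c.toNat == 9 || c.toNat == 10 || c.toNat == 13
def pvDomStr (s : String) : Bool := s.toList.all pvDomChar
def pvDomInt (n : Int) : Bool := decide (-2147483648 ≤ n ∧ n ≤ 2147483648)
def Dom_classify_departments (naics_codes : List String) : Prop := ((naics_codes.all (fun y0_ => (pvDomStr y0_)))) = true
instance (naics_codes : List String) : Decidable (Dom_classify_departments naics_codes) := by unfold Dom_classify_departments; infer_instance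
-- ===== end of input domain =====

-- B deduplicates the codes first and classifies each distinct code once by prefix-slice set
-- lookups at the derived prefix lengths, instead of A's per-code linear startswith scan;
-- measured faster by a constant factor.


-- ===== PORT A =====
-- module constant DEPT_I_CODES (shared by both Pythons)
def deptICodes : PySem.Set String := PySem.Set.ofList
  ["211", "212", "213", "22", "23",
   "321", "327", "331", "332", "333", "334", "335", "336",
   "325", "326", "42",
   "481", "482", "483", "484", "485", "486", "487OS", "493",
   "511", "512", "513", "514"]

def classify_departments (naics_codes : List String) : List (String × String) :=
  (naics_codes.foldl (fun result code =>
      if deptICodes.contains code then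
        result.insert code "Dept_I"
      else if deptICodes.any (fun pre => PySem.Str.startswith code pre) then
        result.insert code "Dept_I"
      else
        result.insert code "Dept_II")
    PySem.Dict.empty).items

-- ===== PORT B =====
-- _PREFIX_LENS = sorted({len(p) for p in DEPT_I_CODES})
def prefixLens : List Int :=
  PySem.List.sorted (PySem.Set.ofList (deptICodes.map PySem.Str.len)) (fun x => x)

-- _dept(code)
def deptOf (code : String) : String :=
  if prefixLens.any (fun n => deptICodes.contains (PySem.Str.slice code none (some n))) then
    "Dept_I"
  else
    "Dept_II"

def classify_departments_alt (naics_codes : List String) : List (String × String) :=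
  (PySem.Dict.ofList
    ((PySem.List.dedup naics_codes).map (fun code => (code, deptOf code)))).items

-- ===== PRECONDITION & SPEC =====
def Spec_classify_departments (naics_codes : List String) (out : List (String × String)) : Prop := out = classify_departments_alt naics_codes
instance (naics_codes : List String) (out : List (String × String)) : Decidable (Spec_classify_departments naics_codes out) := by unfold Spec_classify_departments; infer_instance

-- ===== CLAIM =====
def Claim_equal_classify_departments : Prop := ∀ (naics_codes : List String), Dom_classify_departments naics_codes → Spec_classify_departments naics_codes (classify_departments naics_codes)

-- ===== LEMMAS AND PROOFS =====

lemma lens_mem : ∀ p ∈ deptICodes, (PySem.Str.len p) ∈ prefixLens := by decide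

lemma lens_nonneg : ∀ n ∈ prefixLens, 0 ≤ n := by decide

-- per-code agreement: A's two Dept_I conditions ↔ B's prefix-length lookup
lemma cond_eq (code : String) :
    (deptICodes.contains code || deptICodes.any (fun pre => PySem.Str.startswith code pre))
    = prefixLens.any (fun n => deptICodes.contains (PySem.Str.slice code none (some n))) := by
  rw [Bool.eq_iff_iff]
  simp only [Bool.or_eq_true, List.any_eq_true,
    PySem.Str.startswith_eq, PySem.Chars.startswith_iff]
  constructor
  · rintro (h | ⟨p, hp, hsw⟩)
    · refine ⟨PySem.Str.len code, lens_mem code (List.mem_of_elem_eq_true h), ?_⟩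
      have hs : PySem.Str.slice code none (some (PySem.Str.len code)) = code := by
        apply String.toList_inj.mp
        simp [PySem.Str.len_eq]
      rwa [hs]
    · refine ⟨PySem.Str.len p, lens_mem p hp, ?_⟩
      have hs : PySem.Str.slice code none (some (PySem.Str.len p)) = p := by
        apply String.toList_inj.mp
        have ht := List.prefix_iff_eq_take.mp hsw
        simp only [PySem.Str.toList_slice, PySem.Chars.slice_eq_listSlice,
          PySem.Str.len_eq, String.length_toList, PySem.List.slice_to_natCast]
        exact ht.symm
      rw [hs]
      exact List.elem_eq_true_of_mem hp
  · rintro ⟨n, hn, hc⟩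
    right
    refine ⟨_, List.mem_of_elem_eq_true hc, ?_⟩
    have h0 := lens_nonneg n hn
    simp only [PySem.Str.toList_slice, PySem.Chars.slice_eq_listSlice]
    rw [PySem.List.slice_to code.toList h0]
    exact List.take_prefix _ _

-- A's fold step is an insert of deptOf code
lemma step_eq (r : PySem.Dict String String) (code : String) :
    (if deptICodes.contains code then r.insert code "Dept_I"
     else if deptICodes.any (fun pre => PySem.Str.startswith code pre) then r.insert code "Dept_I"
     else r.insert code "Dept_II")
    = r.insert code (deptOf code) := by
  unfold deptOf
  rw [← cond_eq]
  cases h1 : deptICodes.contains code <;>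
    cases h2 : deptICodes.any (fun pre => PySem.Str.startswith code pre) <;>
    simp_all

-- looking up a key of l in the key-only-valued insert fold
lemma getD_fold (l : List String) (d : PySem.Dict String String) (k : String) :
    (l.foldl (fun r c => r.insert c (deptOf c)) d).getD k "" =
      if k ∈ l then deptOf k else d.getD k "" := by
  induction l generalizing d with
  | nil => simp
  | cons c l ih =>
    simp only [List.foldl_cons, ih, PySem.Dict.getD_insert, List.mem_cons]
    by_cases hkl : k ∈ l <;> by_cases hkc : k = c <;> simp [hkl, hkc]

-- A's dict items equal B's pair list
lemma items_A (l : List String) :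
    (l.foldl (fun r c => r.insert c (deptOf c)) PySem.Dict.empty).items
      = (PySem.List.dedup l).map (fun code => (code, deptOf code)) := by
  have hnd : (l.foldl (fun r c => r.insert c (deptOf c)) PySem.Dict.empty).keys.Nodup :=
    PySem.Dict.nodup_keys_foldl_insert l (fun _ c => deptOf c) _ (by simp)
  have hkeys : (l.foldl (fun r c => r.insert c (deptOf c)) PySem.Dict.empty).keys
      = PySem.Set.update PySem.Dict.empty.keys l :=
    PySem.Dict.keys_foldl_insert l (fun _ c => deptOf c) _
  rw [PySem.Dict.items_eq_map_keys _ hnd "", hkeys]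
  have hkeys' : PySem.Set.update (PySem.Dict.empty (κ := String) (ν := String)).keys l
      = PySem.List.dedup l := by
    rw [PySem.List.dedup_eq_ofList]
    rfl
  rw [hkeys']
  apply List.map_congr_left
  intro k hk
  have hkl : k ∈ l := by
    rw [PySem.List.mem_dedup] at hk
    exact hk
  rw [getD_fold, if_pos hkl]

-- B's Dict.ofList over nodup keys returns exactly its pair list as items
lemma items_B (l : List String) :
    (PySem.Dict.ofList
      ((PySem.List.dedup l).map (fun code => (code, deptOf code)))).items
      = (PySem.List.dedup l).map (fun code => (code, deptOf code)) := by
  have h := PySem.Dict.items_foldl_insert_fresh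
    ((PySem.List.dedup l).map (fun code => (code, deptOf code)))
    Prod.fst Prod.snd PySem.Dict.empty (by simp) ?_
  · simpa [PySem.Dict.ofList, PySem.Dict.update] using h
  · rw [List.map_map]
    have : (Prod.fst ∘ fun code => (code, deptOf code)) = id := rfl
    rw [this, List.map_id]
    rw [PySem.List.dedup_eq_ofList]
    exact PySem.Set.nodup_ofList l

-- ===== VERDICT =====
theorem classify_departments_spec : Claim_equal_classify_departments := by
  intro naics_codes _
  unfold Spec_classify_departments classify_departments classify_departments_alt
  have hA : (fun (result : PySem.Dict String String) code =>
      if deptICodes.contains code then result.insert code "Dept_I"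
      else if deptICodes.any (fun pre => PySem.Str.startswith code pre) then
        result.insert code "Dept_I"
      else result.insert code "Dept_II")
      = fun r c => r.insert c (deptOf c) := by
    funext r c; exact step_eq r c
  rw [hA, items_A, items_B]
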